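-- pv_equiv track=rewrite | github.com/mebmrauf/HackerRank | Problem Solving (Basic)/Difficulty Level Medium/Cloudy Day.py | maximumPeople
-- ===== SOURCE A (Python) =====
-- def maximumPeople(p, x, y, r):
--     if len(y) == 1 or len(y) == 0:
--         return sum(p) # if there is 1 cloud they can remove it and if it's 0 cloud nothing to remove.
--     else:
--         sunnyPeople = sum(p)
--         for l in range(len(x)): # len(x) or len(p) no of towns
--             count = 0
--             for c in range(len(y)): # len(y) no of clouds
--                 if y[c] - r[c] <= x[l] <= y[c] + r[c]:
--                     if count == 0:
--                         sunnyPeople -= p[l]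
--                         count+=1
--                     break
--         return sunnyPeople
-- ===== SOURCE B (Python) =====
-- def maximumPeople(p, x, y, r):
--     # Merge the cloud intervals into a sorted disjoint union once, then binary-search
--     # each town for coverage instead of scanning all clouds per town.
--     total = sum(p)
--     if len(y) <= 1:
--         return total
--     ivs = sorted([(yi - ri, yi + ri) for yi, ri in zip(y, r)], key=lambda t: t[0])
--     merged = []
--     cur = None
--     for lo, hi in ivs:
--         if cur is None:
--             cur = (lo, hi)
--         elif lo <= cur[1]:
--             if hi > cur[1]:
--                 cur = (cur[0], hi)
--         else:
--             merged.append(cur)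
--             cur = (lo, hi)
--     if cur is not None:
--         merged.append(cur)
--     starts = [iv[0] for iv in merged]
--     for xi, pi in zip(x, p):
--         lo, hi = 0, len(starts)
--         while lo < hi:
--             mid = (lo + hi) // 2
--             if starts[mid] <= xi:
--                 lo = mid + 1
--             else:
--                 hi = mid
--         if lo > 0 and xi <= merged[lo - 1][1]:
--             total -= pi
--     return total
-- ===== Notes on version B (the rewrite author's own statement) =====
-- stated objective: faster
-- what changed: Instead of scanning every cloud for every town (nested loops with a break), B sorts the cloud intervals once, merges them into a disjoint union, and binary-searches each town against the merged starts.
-- outside the precondition, e.g. on maximumPeople([5], [0], [0, 1], [100]): A returns 0, B returns 0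
import Mathlib
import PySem

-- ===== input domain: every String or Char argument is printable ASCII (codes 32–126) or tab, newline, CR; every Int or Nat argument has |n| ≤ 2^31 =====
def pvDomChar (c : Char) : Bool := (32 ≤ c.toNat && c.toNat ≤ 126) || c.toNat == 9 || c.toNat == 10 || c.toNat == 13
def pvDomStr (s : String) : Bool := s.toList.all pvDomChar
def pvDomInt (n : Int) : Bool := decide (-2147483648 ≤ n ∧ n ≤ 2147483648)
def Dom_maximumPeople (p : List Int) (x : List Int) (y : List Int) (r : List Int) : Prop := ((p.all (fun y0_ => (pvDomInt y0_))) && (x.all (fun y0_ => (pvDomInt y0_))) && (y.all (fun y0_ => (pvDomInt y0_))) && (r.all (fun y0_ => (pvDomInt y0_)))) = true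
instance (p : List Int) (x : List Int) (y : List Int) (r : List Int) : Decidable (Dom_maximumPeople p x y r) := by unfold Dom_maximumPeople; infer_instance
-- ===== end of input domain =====

-- B replaces A's per-town scan over all clouds by: sort the cloud intervals once, merge them
-- into a disjoint union, then binary-search each town in the merged starts (objective: faster).

-- ===== PORT A =====
-- the inner 'for c in range(len(y))' loop of A, with its count variable and break
def pvAInner (y r : List Int) (xl pl : Int) : List Int → Int × Int → Int × Int
  | [], st => st
  | c :: cs, st =>
    if PySem.List.pyGetD y c 0 - PySem.List.pyGetD r c 0 ≤ xl ∧ xl ≤ PySem.List.pyGetD y c 0 + PySem.List.pyGetD r c 0 then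
      (if st.2 = 0 then (st.1 - pl, st.2 + 1) else st)
    else pvAInner y r xl pl cs st

def maximumPeople (p : List Int) (x : List Int) (y : List Int) (r : List Int) : Int :=
  if y.length = 1 ∨ y.length = 0 then p.sum
  else
    (PySem.List.pyRange 0 (x.length : Int) 1).foldl
      (fun s l =>
        (pvAInner y r (PySem.List.pyGetD x l 0) (PySem.List.pyGetD p l 0)
          (PySem.List.pyRange 0 (y.length : Int) 1) (s, 0)).1)
      p.sum

-- ===== PORT B =====
-- one step of Source B's merge loop over the sorted intervals; state = (merged, cur)
def pvMergeStep (st : List (Int × Int) × Option (Int × Int)) (iv : Int × Int) :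
    List (Int × Int) × Option (Int × Int) :=
  match st.2 with
  | none => (st.1, some iv)
  | some c =>
    if iv.1 ≤ c.2 then
      (st.1, some (c.1, if c.2 < iv.2 then iv.2 else c.2))
    else (st.1 ++ [c], some iv)

-- Source B's hand-written bisect-right while-loop
def pvBSearch (starts : List Int) (xi : Int) (lo hi : Int) : Int :=
  if h : lo < hi then
    let mid := PySem.Int.floordiv (lo + hi) 2
    if PySem.List.pyGetD starts mid 0 ≤ xi then pvBSearch starts xi (mid + 1) hi
    else pvBSearch starts xi lo mid
  else lo
termination_by (hi - lo).toNat
decreasing_by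
  · have := PySem.Int.floordiv_two_mid_bounds (le_of_lt h)
    omega
  · have := PySem.Int.floordiv_two_mid_bounds (le_of_lt h)
    have : PySem.Int.floordiv (lo + hi) 2 < hi := by
      rw [PySem.Int.floordiv_eq_ediv_of_pos (by omega)]; omega
    omega

def maximumPeople_alt (p : List Int) (x : List Int) (y : List Int) (r : List Int) : Int :=
  let total := p.sum
  if y.length ≤ 1 then total
  else
    let ivs := PySem.List.sorted ((y.zip r).map (fun q => (q.1 - q.2, q.1 + q.2))) (fun t => t.1) false
    let st := ivs.foldl pvMergeStep ([], none)
    let merged := st.1 ++ st.2.toList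
    let starts := merged.map (fun iv => iv.1)
    (x.zip p).foldl
      (fun tot q =>
        let j := pvBSearch starts q.1 0 (starts.length : Int)
        if 0 < j ∧ q.1 ≤ (PySem.List.pyGetD merged (j - 1) (0, 0)).2 then tot - q.2 else tot)
      total

-- ===== PRECONDITION & SPEC =====
-- Pre_ excludes mismatched-length inputs (fewer radii than clouds, or fewer populations than
-- town positions, with at least 2 clouds): there A indexes r[c] / p[l] out of range and can
-- raise IndexError (on the subset of such inputs where every town happens to be covered by an
-- early cloud, A still returns and B agrees with it — see the cites).
def Pre_maximumPeople (p : List Int) (x : List Int) (y : List Int) (r : List Int) : Prop :=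
  2 ≤ y.length → (y.length ≤ r.length ∧ x.length ≤ p.length)
instance (p : List Int) (x : List Int) (y : List Int) (r : List Int) : Decidable (Pre_maximumPeople p x y r) := by unfold Pre_maximumPeople; infer_instance

def pvWitness_maximumPeople : List Int × List Int × List Int × List Int :=
  ([3, 4], [1, 5], [0, 10], [2, 2])

def Spec_maximumPeople (p : List Int) (x : List Int) (y : List Int) (r : List Int) (out : Int) : Prop := out = maximumPeople_alt p x y r
instance (p : List Int) (x : List Int) (y : List Int) (r : List Int) (out : Int) : Decidable (Spec_maximumPeople p x y r out) := by unfold Spec_maximumPeople; infer_instance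

-- ===== CLAIM (what is proved, stated in full; the proofs are below) =====
def Claim_equal_maximumPeople : Prop := ∀ (p : List Int) (x : List Int) (y : List Int) (r : List Int), Dom_maximumPeople p x y r → Pre_maximumPeople p x y r → Spec_maximumPeople p x y r (maximumPeople p x y r)

-- ===== LEMMAS AND PROOFS =====
-- an interval (lo, hi) contains xi
def pvIn (xi : Int) (iv : Int × Int) : Prop := iv.1 ≤ xi ∧ xi ≤ iv.2
-- xi lies in some interval of the list
def pvCov (xi : Int) (M : List (Int × Int)) : Prop := ∃ iv ∈ M, pvIn xi iv
-- disjoint, left-to-right ordering of merged intervals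
def pvR (a b : Int × Int) : Prop := a.2 < b.1 ∧ a.1 ≤ b.1

theorem pvAInner_char (y r : List Int) (xl pl : Int) (cs : List Int) (s : Int) :
    (pvAInner y r xl pl cs (s, 0)).1 =
      if ∃ c ∈ cs, PySem.List.pyGetD y c 0 - PySem.List.pyGetD r c 0 ≤ xl ∧
          xl ≤ PySem.List.pyGetD y c 0 + PySem.List.pyGetD r c 0 then s - pl else s := by
  induction cs with
  | nil =>
    rw [pvAInner, if_neg]
    rintro ⟨c, hc, -⟩; exact absurd hc (List.not_mem_nil)
  | cons c cs ih =>
    by_cases hc : PySem.List.pyGetD y c 0 - PySem.List.pyGetD r c 0 ≤ xl ∧ xl ≤ PySem.List.pyGetD y c 0 + PySem.List.pyGetD r c 0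
    · have hex : ∃ c' ∈ c :: cs, PySem.List.pyGetD y c' 0 - PySem.List.pyGetD r c' 0 ≤ xl ∧ xl ≤ PySem.List.pyGetD y c' 0 + PySem.List.pyGetD r c' 0 := ⟨c, List.mem_cons_self, hc⟩
      rw [pvAInner, if_pos hc, if_pos hex]
      rfl
    · rw [pvAInner, if_neg hc, ih]
      by_cases h2 : ∃ c' ∈ cs, PySem.List.pyGetD y c' 0 - PySem.List.pyGetD r c' 0 ≤ xl ∧ xl ≤ PySem.List.pyGetD y c' 0 + PySem.List.pyGetD r c' 0
      · obtain ⟨c', hm, hp⟩ := h2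
        rw [if_pos ⟨c', hm, hp⟩, if_pos ⟨c', List.mem_cons_of_mem c hm, hp⟩]
      · rw [if_neg h2, if_neg]
        rintro ⟨c', hm, hp⟩
        rcases List.mem_cons.mp hm with h | h
        · exact hc (h ▸ hp)
        · exact h2 ⟨c', h, hp⟩

theorem pv_fold_bridge (q : Int → Bool) :
    ∀ (x p : List Int) (init : Int), x.length ≤ p.length →
      (PySem.List.pyRange 0 (x.length : Int) 1).foldl
        (fun s l => if q (PySem.List.pyGetD x l 0) then s - PySem.List.pyGetD p l 0 else s) init
      = (x.zip p).foldl (fun s t => if q t.1 then s - t.2 else s) init := by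
  intro x
  induction x with
  | nil => intro p init h; simp [PySem.List.pyRange_one_eq_nil]
  | cons a x ih =>
    intro p init h
    cases p with
    | nil => simp at h
    | cons b p =>
      simp only [List.length_cons] at h ⊢
      have h' : x.length ≤ p.length := by omega
      have hcons : PySem.List.pyRange 0 ((x.length : Int) + 1) 1
          = 0 :: PySem.List.pyRange 1 ((x.length : Int) + 1) 1 :=
        PySem.List.pyRange_one_cons (by omega)
      rw [show ((x.length + 1 : Nat) : Int) = (x.length : Int) + 1 by push_cast; ring, hcons]
      simp only [List.foldl_cons, List.zip_cons_cons]
      have hget0x : PySem.List.pyGetD (a :: x) 0 0 = a := PySem.List.pyGetD_zero_cons a x 0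
      have hget0p : PySem.List.pyGetD (b :: p) 0 0 = b := PySem.List.pyGetD_zero_cons b p 0
      rw [hget0x, hget0p]
      have hshiftx : ∀ k : Nat, PySem.List.pyGetD (a :: x) ((k : Int) + 1) 0 = PySem.List.pyGetD x (k : Int) 0 := by
        intro k
        simp [PySem.List.pyGetD, PySem.List.pyGet?_cons_succ]
      have hshiftp : ∀ k : Nat, PySem.List.pyGetD (b :: p) ((k : Int) + 1) 0 = PySem.List.pyGetD p (k : Int) 0 := by
        intro k
        simp [PySem.List.pyGetD, PySem.List.pyGet?_cons_succ]
      have hn1 : (((x.length : Int) + 1) - 1).toNat = x.length := by omega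
      have hr1 : PySem.List.pyRange 1 ((x.length : Int) + 1) 1
          = (List.range x.length).map (fun k : Nat => 1 + (k : Int)) := by
        rw [PySem.List.pyRange_one, hn1]
      have hn0 : ((x.length : Int) - 0).toNat = x.length := by omega
      have hr0 : PySem.List.pyRange 0 (x.length : Int) 1
          = (List.range x.length).map (fun k : Nat => 0 + (k : Int)) := by
        rw [PySem.List.pyRange_one, hn0]
      rw [hr1, List.foldl_map]
      rw [← ih p _ h', hr0, List.foldl_map]
      congr 1
      funext s k
      rw [show (1 : Int) + (k : Int) = (k : Int) + 1 by ring, hshiftx k, hshiftp k,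
        show (0 : Int) + (k : Int) = (k : Int) by ring]

theorem pv_cov_zip (y r : List Int) (hyr : y.length ≤ r.length) (xi : Int) :
    (∃ c ∈ PySem.List.pyRange 0 (y.length : Int) 1,
        PySem.List.pyGetD y c 0 - PySem.List.pyGetD r c 0 ≤ xi ∧
        xi ≤ PySem.List.pyGetD y c 0 + PySem.List.pyGetD r c 0)
      ↔ pvCov xi ((y.zip r).map (fun q => (q.1 - q.2, q.1 + q.2))) := by
  constructor
  · rintro ⟨c, hc, h1, h2⟩
    rw [PySem.List.mem_pyRange_one] at hc
    obtain ⟨hc0, hcl⟩ := hc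
    have hk : c.toNat < y.length := by omega
    have hkr : c.toNat < r.length := by omega
    have hgy : PySem.List.pyGetD y c 0 = y[c.toNat] :=
      PySem.List.pyGetD_eq_getElem y 0 hc0 (by exact hcl)
    have hgr : PySem.List.pyGetD r c 0 = r[c.toNat] :=
      PySem.List.pyGetD_eq_getElem r 0 hc0 (by push_cast; omega)
    have hzlen : c.toNat < (y.zip r).length := by
      rw [List.length_zip]; omega
    refine ⟨(((y.zip r)[c.toNat]).1 - ((y.zip r)[c.toNat]).2,
            ((y.zip r)[c.toNat]).1 + ((y.zip r)[c.toNat]).2), ?_, ?_⟩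
    · exact List.mem_map_of_mem (List.getElem_mem hzlen)
    · have hz : (y.zip r)[c.toNat] = (y[c.toNat], r[c.toNat]) := List.getElem_zip ..
      constructor
      · rw [hz]; dsimp; rw [hgy, hgr] at h1; exact h1
      · rw [hz]; dsimp; rw [hgy, hgr] at h2; exact h2
  · rintro ⟨iv, hiv, hin⟩
    obtain ⟨q, hq, rfl⟩ := List.mem_map.mp hiv
    obtain ⟨k, hk, hqe⟩ := List.getElem_of_mem hq
    have hky : k < y.length := by
      rw [List.length_zip] at hk; omega
    have hz : (y.zip r)[k] = (y[k], r[k]) := List.getElem_zip ..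
    refine ⟨(k : Int), ?_, ?_, ?_⟩
    · rw [PySem.List.mem_pyRange_one]
      constructor
      · omega
      · exact_mod_cast hky
    · have hgy : PySem.List.pyGetD y (k : Int) 0 = y[k] := by
        rw [PySem.List.pyGetD_eq_getElem y 0 (by omega) (by push_cast; omega)]
        simp
      have hgr : PySem.List.pyGetD r (k : Int) 0 = r[k] := by
        rw [PySem.List.pyGetD_eq_getElem r 0 (by omega) (by push_cast; omega)]
        simp
      rw [hgy, hgr]
      have : q = (y[k], r[k]) := by rw [← hqe, hz]
      subst this
      exact hin.1
    · have hgy : PySem.List.pyGetD y (k : Int) 0 = y[k] := by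
        rw [PySem.List.pyGetD_eq_getElem y 0 (by omega) (by push_cast; omega)]
        simp
      have hgr : PySem.List.pyGetD r (k : Int) 0 = r[k] := by
        rw [PySem.List.pyGetD_eq_getElem r 0 (by omega) (by push_cast; omega)]
        simp
      rw [hgy, hgr]
      have : q = (y[k], r[k]) := by rw [← hqe, hz]
      subst this
      exact hin.2

theorem pvCov_append (xi : Int) (l1 l2 : List (Int × Int)) :
    pvCov xi (l1 ++ l2) ↔ pvCov xi l1 ∨ pvCov xi l2 := by
  unfold pvCov
  constructor
  · rintro ⟨iv, hiv, hin⟩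
    rcases List.mem_append.mp hiv with h | h
    · exact Or.inl ⟨iv, h, hin⟩
    · exact Or.inr ⟨iv, h, hin⟩
  · rintro (⟨iv, h, hin⟩ | ⟨iv, h, hin⟩)
    · exact ⟨iv, List.mem_append.mpr (Or.inl h), hin⟩
    · exact ⟨iv, List.mem_append.mpr (Or.inr h), hin⟩

theorem pvCov_cons (xi : Int) (iv : Int × Int) (l : List (Int × Int)) :
    pvCov xi (iv :: l) ↔ pvIn xi iv ∨ pvCov xi l := by
  unfold pvCov
  constructor
  · rintro ⟨a, ha, hin⟩
    rcases List.mem_cons.mp ha with h | h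
    · exact Or.inl (h ▸ hin)
    · exact Or.inr ⟨a, h, hin⟩
  · rintro (h | ⟨a, ha, hin⟩)
    · exact ⟨iv, List.mem_cons_self, h⟩
    · exact ⟨a, List.mem_cons_of_mem iv ha, hin⟩

theorem pvCov_nil (xi : Int) : pvCov xi [] ↔ False := by
  unfold pvCov; simp

theorem pvCov_singleton (xi : Int) (iv : Int × Int) : pvCov xi [iv] ↔ pvIn xi iv := by
  unfold pvCov; simp

theorem pvCov_sorted (xi : Int) (l : List (Int × Int)) (key : Int × Int → Int) (rev : Bool) :
    pvCov xi (PySem.List.sorted l key rev) ↔ pvCov xi l := by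
  unfold pvCov
  constructor
  · rintro ⟨iv, hiv, hin⟩
    exact ⟨iv, (PySem.List.mem_sorted l key rev iv).mp hiv, hin⟩
  · rintro ⟨iv, hiv, hin⟩
    exact ⟨iv, (PySem.List.mem_sorted l key rev iv).mpr hiv, hin⟩

theorem pv_merge_cov (xi : Int) :
    ∀ (ivs : List (Int × Int)) (m : List (Int × Int)) (cur : Option (Int × Int)),
      (∀ c, cur = some c → ∀ iv ∈ ivs, c.1 ≤ iv.1) →
      ivs.Pairwise (fun a b => a.1 ≤ b.1) →
      (pvCov xi ((ivs.foldl pvMergeStep (m, cur)).1 ++ (ivs.foldl pvMergeStep (m, cur)).2.toList)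
        ↔ pvCov xi (m ++ cur.toList) ∨ pvCov xi ivs) := by
  intro ivs
  induction ivs with
  | nil =>
    intro m cur hcur hpw
    rw [List.foldl_nil]
    rw [pvCov_nil xi]
    tauto
  | cons iv ivs ih =>
    intro m cur hcur hpw
    rw [List.foldl_cons]
    have hpw' : ivs.Pairwise (fun a b => a.1 ≤ b.1) := (List.pairwise_cons.mp hpw).2
    have hhead : ∀ b ∈ ivs, iv.1 ≤ b.1 := (List.pairwise_cons.mp hpw).1
    cases cur with
    | none =>
      have hstep : pvMergeStep (m, none) iv = (m, some iv) := rfl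
      rw [hstep, ih m (some iv) (by intro c hc; injection hc with hc; subst hc; exact hhead) hpw']
      simp only [Option.toList_some, Option.toList_none, List.append_nil]
      rw [pvCov_append, pvCov_singleton, pvCov_cons]
      tauto
    | some c =>
      by_cases hle : iv.1 ≤ c.2
      · have hstep : pvMergeStep (m, some c) iv = (m, some (c.1, if c.2 < iv.2 then iv.2 else c.2)) := by
          simp [pvMergeStep, hle]
        have hc1 : c.1 ≤ iv.1 := hcur c rfl iv List.mem_cons_self
        rw [hstep, ih m _ (by intro c' hc'; injection hc' with hc'; subst hc'
                              intro iv' hiv'; exact hcur c rfl iv' (List.mem_cons_of_mem iv hiv')) hpw']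
        have hunion : pvIn xi (c.1, if c.2 < iv.2 then iv.2 else c.2) ↔ pvIn xi c ∨ pvIn xi iv := by
          unfold pvIn
          dsimp
          split_ifs with h
          · constructor
            · rintro ⟨ha, hb⟩
              by_cases hx : xi ≤ c.2
              · exact Or.inl ⟨ha, hx⟩
              · exact Or.inr ⟨by omega, hb⟩
            · rintro (⟨ha, hb⟩ | ⟨ha, hb⟩) <;> exact ⟨by omega, by omega⟩
          · constructor
            · rintro ⟨ha, hb⟩
              exact Or.inl ⟨ha, hb⟩
            · rintro (⟨ha, hb⟩ | ⟨ha, hb⟩) <;> exact ⟨by omega, by omega⟩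
        simp only [Option.toList_some]
        rw [pvCov_append, pvCov_append, pvCov_singleton, pvCov_singleton, pvCov_cons, hunion]
        tauto
      · have hstep : pvMergeStep (m, some c) iv = (m ++ [c], some iv) := by
          simp [pvMergeStep, hle]
        rw [hstep, ih (m ++ [c]) (some iv) (by intro c' hc'; injection hc' with hc'; subst hc'; exact hhead) hpw']
        simp only [Option.toList_some]
        simp only [pvCov_append, pvCov_singleton, pvCov_cons]
        tauto

theorem pv_merge_chain :
    ∀ (ivs : List (Int × Int)) (m : List (Int × Int)) (cur : Option (Int × Int)),
      (∀ c, cur = some c → (∀ a ∈ m, pvR a c) ∧ ∀ iv ∈ ivs, c.1 ≤ iv.1) →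
      (cur = none → m = []) →
      m.Pairwise pvR →
      ivs.Pairwise (fun a b => a.1 ≤ b.1) →
      ((ivs.foldl pvMergeStep (m, cur)).1 ++ (ivs.foldl pvMergeStep (m, cur)).2.toList).Pairwise pvR := by
  intro ivs
  induction ivs with
  | nil =>
    intro m cur hcur _hnone hm _hpw
    cases cur with
    | none => simpa using hm
    | some c =>
      rw [List.foldl_nil]
      rw [List.pairwise_append]
      refine ⟨hm, by simp, ?_⟩
      intro a ha b hb
      simp only [Option.toList_some, List.mem_singleton] at hb
      subst hb
      exact (hcur _ rfl).1 a ha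
  | cons iv ivs ih =>
    intro m cur hcur hnone hm hpw
    rw [List.foldl_cons]
    have hpw' : ivs.Pairwise (fun a b => a.1 ≤ b.1) := (List.pairwise_cons.mp hpw).2
    have hhead : ∀ b ∈ ivs, iv.1 ≤ b.1 := (List.pairwise_cons.mp hpw).1
    cases cur with
    | none =>
      have hm0 : m = [] := hnone rfl
      subst hm0
      have hstep : pvMergeStep (([] : List (Int × Int)), (none : Option (Int × Int))) iv = ([], some iv) := rfl
      rw [hstep]
      exact ih [] (some iv) (by intro c hc; injection hc with hc; subst hc; exact ⟨by simp, hhead⟩) (by simp) (by simp) hpw'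
    | some c =>
      by_cases hle : iv.1 ≤ c.2
      · have hstep : pvMergeStep (m, some c) iv = (m, some (c.1, if c.2 < iv.2 then iv.2 else c.2)) := by
          simp [pvMergeStep, hle]
        rw [hstep]
        refine ih m _ ?_ (by simp) hm hpw'
        intro c' hc'
        injection hc' with hc'
        subst hc'
        constructor
        · intro a ha
          have := (hcur c rfl).1 a ha
          exact ⟨this.1, this.2⟩
        · intro iv' hiv'
          exact (hcur c rfl).2 iv' (List.mem_cons_of_mem iv hiv')
      · have hstep : pvMergeStep (m, some c) iv = (m ++ [c], some iv) := by
          simp [pvMergeStep, hle]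
        rw [hstep]
        have hciv : c.1 ≤ iv.1 := (hcur c rfl).2 iv List.mem_cons_self
        refine ih (m ++ [c]) (some iv) ?_ (by simp) ?_ hpw'
        · intro c' hc'
          injection hc' with hc'
          subst hc'
          constructor
          · intro a ha
            rcases List.mem_append.mp ha with h | h
            · have h2 := (hcur c rfl).1 a h
              have h21 : a.2 < c.1 := h2.1
              have h22 : a.1 ≤ c.1 := h2.2
              exact ⟨by omega, by omega⟩
            · simp only [List.mem_singleton] at h
              subst h
              exact ⟨by omega, hciv⟩
          · exact hhead
        · rw [List.pairwise_append]
          refine ⟨hm, by simp, ?_⟩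
          intro a ha b hb
          simp only [List.mem_singleton] at hb
          subst hb
          exact (hcur _ rfl).1 a ha

theorem pvBSearch_spec (starts : List Int) (xi : Int) :
    ∀ (n : Nat) (lo hi : Int), (hi - lo).toNat = n → 0 ≤ lo → lo ≤ hi → hi ≤ starts.length →
      (0 < lo → PySem.List.pyGetD starts (lo - 1) 0 ≤ xi) →
      (hi < starts.length → xi < PySem.List.pyGetD starts hi 0) →
      lo ≤ pvBSearch starts xi lo hi ∧ pvBSearch starts xi lo hi ≤ hi ∧
      (0 < pvBSearch starts xi lo hi → PySem.List.pyGetD starts (pvBSearch starts xi lo hi - 1) 0 ≤ xi) ∧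
      (pvBSearch starts xi lo hi < starts.length → xi < PySem.List.pyGetD starts (pvBSearch starts xi lo hi) 0) := by
  intro n
  induction n using Nat.strong_induction_on with
  | _ n ih =>
    intro lo hi hn h0 hlh hhl hpre hpost
    by_cases h : lo < hi
    · rw [pvBSearch, dif_pos h]
      have hmid := PySem.Int.floordiv_two_mid_bounds (le_of_lt h)
      have hmidlt : PySem.Int.floordiv (lo + hi) 2 < hi := by
        rw [PySem.Int.floordiv_eq_ediv_of_pos (by omega)]; omega
      set mid := PySem.Int.floordiv (lo + hi) 2 with hmiddef
      by_cases hc : PySem.List.pyGetD starts mid 0 ≤ xi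
      · rw [if_pos hc]
        have := ih (hi - (mid + 1)).toNat (by omega) (mid + 1) hi (by omega) (by omega) (by omega) hhl
          (by intro _; have : mid + 1 - 1 = mid := by ring
              rw [this]; exact hc) hpost
        exact ⟨by omega, this.2.1, this.2.2.1, this.2.2.2⟩
      · rw [if_neg hc]
        push Not at hc
        have := ih (mid - lo).toNat (by omega) lo mid (by omega) h0 (by omega) (by omega) hpre
          (by intro _; exact hc)
        refine ⟨this.1, by omega, this.2.2.1, ?_⟩
        intro hlt
        by_cases hmlt : pvBSearch starts xi lo mid < mid
        · exact this.2.2.2 (by omega)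
        · have : pvBSearch starts xi lo mid = mid := by omega
          rw [this]
          exact hc
    · rw [pvBSearch, dif_neg h]
      have heq : lo = hi := by omega
      subst heq
      exact ⟨le_refl lo, le_refl lo, hpre, fun hlt => hpost hlt⟩

theorem pv_bsearch_cov (M : List (Int × Int)) (hM : M.Pairwise pvR) (xi : Int) :
    (0 < pvBSearch (M.map (fun iv => iv.1)) xi 0 ((M.map (fun iv => iv.1)).length : Int) ∧
      xi ≤ (PySem.List.pyGetD M (pvBSearch (M.map (fun iv => iv.1)) xi 0 ((M.map (fun iv => iv.1)).length : Int) - 1) (0, 0)).2)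
    ↔ pvCov xi M := by
  set starts := M.map (fun iv => iv.1) with hst
  have hlen : starts.length = M.length := by rw [hst, List.length_map]
  have hspec := pvBSearch_spec starts xi starts.length 0 (starts.length : Int)
    (by omega) (by omega) (by omega) (by omega)
    (by intro h; omega) (by intro h; omega)
  set j := pvBSearch starts xi 0 (starts.length : Int) with hj
  obtain ⟨hj0, hjle, hjpre, hjpost⟩ := hspec
  have hgetS : ∀ (i : Int) (h0 : 0 ≤ i) (h1 : i < (M.length : Int)),
      PySem.List.pyGetD starts i 0 = (M[i.toNat]'(by omega)).1 := by
    intro i h0 h1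
    rw [PySem.List.pyGetD_eq_getElem starts 0 h0 (by omega)]
    exact List.getElem_map _
  have hpw := List.pairwise_iff_getElem.mp hM
  constructor
  · rintro ⟨h0j, hxh⟩
    have hjM : (j - 1).toNat < M.length := by omega
    have hgm : PySem.List.pyGetD M (j - 1) (0, 0) = M[(j - 1).toNat] :=
      PySem.List.pyGetD_eq_getElem M (0, 0) (by omega) (by omega)
    refine ⟨M[(j - 1).toNat], List.getElem_mem hjM, ?_, ?_⟩
    · have := hjpre h0j
      rw [hgetS (j - 1) (by omega) (by omega)] at this
      exact this
    · rw [hgm] at hxh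
      exact hxh
  · rintro ⟨iv, hiv, hin⟩
    obtain ⟨k, hk, hke⟩ := List.getElem_of_mem hiv
    have hMpos : 0 < M.length := by omega
    have h0j : 0 < j := by
      by_contra hneg
      have hjz : j = 0 := by omega
      have hlt : j < (starts.length : Int) := by omega
      have := hjpost hlt
      rw [hjz] at this
      rw [hgetS 0 (by omega) (by omega)] at this
      have hm0k : (M[(0 : Int).toNat]'(by omega)).1 ≤ M[k].1 := by
        rcases Nat.eq_zero_or_pos k with h | h
        · subst h; simp
        · exact (hpw 0 k (by omega) hk h).2
      rw [hke] at hm0k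
      have := hin.1
      omega
    refine ⟨h0j, ?_⟩
    have hjM : (j - 1).toNat < M.length := by omega
    have hgm : PySem.List.pyGetD M (j - 1) (0, 0) = M[(j - 1).toNat] :=
      PySem.List.pyGetD_eq_getElem M (0, 0) (by omega) (by omega)
    rw [hgm]
    rcases lt_trichotomy k ((j - 1).toNat) with hkt | hkt | hkt
    · exfalso
      have hRt := hpw k ((j - 1).toNat) (by omega) hjM hkt
      have hj1 := hjpre h0j
      rw [hgetS (j - 1) (by omega) (by omega)] at hj1
      have h1 := hin.2
      rw [← hke] at h1
      have hR1 : M[k].2 < M[(j - 1).toNat].1 := hRt.1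
      omega
    · subst hkt
      rw [hke]
      exact hin.2
    · exfalso
      have hjlt : j < (starts.length : Int) := by omega
      have hpost := hjpost hjlt
      rw [hgetS j (by omega) (by omega)] at hpost
      have hjk : j.toNat ≤ k := by omega
      have hm : (M[j.toNat]'(by omega)).1 ≤ M[k].1 := by
        rcases Nat.eq_or_lt_of_le hjk with h | h
        · subst h
          exact le_refl _
        · exact (hpw j.toNat k (by omega) hk h).2
      rw [hke] at hm
      have := hin.1
      omega


-- ===== VERDICT (by name: the statement is the Claim_ definition above) =====
theorem maximumPeople_spec : Claim_equal_maximumPeople := by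
  unfold Claim_equal_maximumPeople
  intro p x y r _hdom hpre
  unfold Spec_maximumPeople
  unfold Pre_maximumPeople at hpre
  by_cases hy : y.length ≤ 1
  · unfold maximumPeople maximumPeople_alt
    rw [if_pos (by omega), if_pos hy]
  · obtain ⟨hyr, hxp⟩ := hpre (by omega)
    unfold maximumPeople maximumPeople_alt
    rw [if_neg (by omega), if_neg hy]
    dsimp only
    -- name the B-side data
    set ivs := PySem.List.sorted ((y.zip r).map (fun q => (q.1 - q.2, q.1 + q.2))) (fun t => t.1) false with hivs
    set st := ivs.foldl pvMergeStep ([], none) with hstd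
    set merged := st.1 ++ st.2.toList with hmerged
    have hsortpw : ivs.Pairwise (fun a b => a.1 ≤ b.1) := by
      rw [hivs]
      exact PySem.List.sorted_pairwise ((y.zip r).map (fun q => (q.1 - q.2, q.1 + q.2))) (fun t : Int × Int => t.1)
    have hchainM : merged.Pairwise pvR := by
      rw [hmerged, hstd]
      exact pv_merge_chain ivs [] none (by intro c hc; cases hc) (fun _ => rfl) List.Pairwise.nil hsortpw
    have hcov : ∀ xi : Int, pvCov xi merged ↔ pvCov xi ivs := by
      intro xi
      rw [hmerged, hstd]
      rw [pv_merge_cov xi ivs [] none (by intro c hc; cases hc) hsortpw]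
      simp [pvCov_nil]
    have hpred : ∀ xi : Int,
        (∃ c ∈ PySem.List.pyRange 0 (y.length : Int) 1,
            PySem.List.pyGetD y c 0 - PySem.List.pyGetD r c 0 ≤ xi ∧
            xi ≤ PySem.List.pyGetD y c 0 + PySem.List.pyGetD r c 0)
        ↔ (0 < pvBSearch (merged.map (fun iv => iv.1)) xi 0 ((merged.map (fun iv => iv.1)).length : Int) ∧
            xi ≤ (PySem.List.pyGetD merged (pvBSearch (merged.map (fun iv => iv.1)) xi 0 ((merged.map (fun iv => iv.1)).length : Int) - 1) (0, 0)).2) := by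
      intro xi
      rw [pv_cov_zip y r hyr xi, pv_bsearch_cov merged hchainM xi, hcov xi, hivs,
        pvCov_sorted xi _ _ _]
    -- rewrite A's inner loop into a boolean-predicate step
    have hstepA : (fun (s : Int) (l : Int) =>
        (pvAInner y r (PySem.List.pyGetD x l 0) (PySem.List.pyGetD p l 0)
          (PySem.List.pyRange 0 (y.length : Int) 1) (s, 0)).1)
        = fun (s : Int) (l : Int) =>
            if (fun xi => decide (∃ c ∈ PySem.List.pyRange 0 (y.length : Int) 1,
                PySem.List.pyGetD y c 0 - PySem.List.pyGetD r c 0 ≤ xi ∧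
                xi ≤ PySem.List.pyGetD y c 0 + PySem.List.pyGetD r c 0)) (PySem.List.pyGetD x l 0)
            then s - PySem.List.pyGetD p l 0 else s := by
      funext s l
      rw [pvAInner_char]
      simp only [decide_eq_true_eq]
    have hbridge := pv_fold_bridge (fun xi => decide (∃ c ∈ PySem.List.pyRange 0 (y.length : Int) 1,
      PySem.List.pyGetD y c 0 - PySem.List.pyGetD r c 0 ≤ xi ∧
      xi ≤ PySem.List.pyGetD y c 0 + PySem.List.pyGetD r c 0)) x p p.sum hxp
    rw [hstepA, hbridge]
    congr 1
    funext s t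
    simp only [decide_eq_true_eq]
    rw [if_congr (hpred t.1) rfl rfl]
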